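-- pv_equiv track=rewrite | github.com/ggaarder/knnreutersbdc2 | algo.py | category_ABCD
-- ===== SOURCE A (Python) =====
-- def category_ABCD(c, actual, expected):
--     # True Positive and classifier Positive
--     tp_cp = [None for [resu, corr] in zip(actual, expected)
--         if corr == c and resu == c ]
--     A_cnt = len(tp_cp)
--
--     # True Positive and Classifier Negative
--     tp_cn = [None for [resu, corr] in zip(actual, expected)
--         if corr == c and resu != c ]
--     B_cnt = len(tp_cn)
--
--     # True Negative and Classifier Positive
--     tn_cp = [None for [resu, corr] in zip(actual, expected)
--         if corr != c and resu == c ]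
--     C_cnt = len(tn_cp)
--
--     # True Negative and Classifier Negative
--     tn_cn = [None for [resu, corr] in zip(actual, expected)
--         if corr != c and resu != c ]
--     D_cnt = len(tn_cn)
--
--     return A_cnt, B_cnt, C_cnt, D_cnt
-- ===== SOURCE B (Python) =====
-- def category_ABCD(c, actual, expected):
--     A = B = C = D = 0
--     for resu, corr in zip(actual, expected):
--         if corr == c:
--             if resu == c:
--                 A += 1
--             else:
--                 B += 1
--         else:
--             if resu == c:
--                 C += 1
--             else:
--                 D += 1
--     return A, B, C, D
-- ===== Notes on version B (the rewrite author's own statement) =====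
-- stated objective: simpler
-- what changed: Replaces four filtered list comprehensions (four full passes building throwaway lists) with a single pass over zip(actual, expected) maintaining four integer counters.
import Mathlib
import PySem

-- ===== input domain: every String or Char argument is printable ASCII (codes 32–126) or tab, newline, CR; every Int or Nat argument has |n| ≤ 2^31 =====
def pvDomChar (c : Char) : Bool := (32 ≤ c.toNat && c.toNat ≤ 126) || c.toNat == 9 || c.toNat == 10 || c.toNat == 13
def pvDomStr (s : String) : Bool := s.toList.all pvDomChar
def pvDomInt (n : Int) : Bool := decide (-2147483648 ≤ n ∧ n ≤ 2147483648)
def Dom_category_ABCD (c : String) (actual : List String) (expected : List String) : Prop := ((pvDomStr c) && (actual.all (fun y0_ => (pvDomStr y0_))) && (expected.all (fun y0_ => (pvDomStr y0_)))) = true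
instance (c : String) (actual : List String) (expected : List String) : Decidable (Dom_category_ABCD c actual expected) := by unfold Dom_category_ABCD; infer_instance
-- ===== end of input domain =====

-- ===== PORT A =====
-- One-line honest header: B replaces A's four filtered comprehensions with one counting pass; simpler.
def category_ABCD (c : String) (actual : List String) (expected : List String) : Int × Int × Int × Int :=
  let pairs := actual.zip expected
  let tp_cp := (pairs.filter (fun p => p.2 == c && p.1 == c)).map (fun _ => ())
  let A_cnt : Int := tp_cp.length
  let tp_cn := (pairs.filter (fun p => p.2 == c && p.1 != c)).map (fun _ => ())
  let B_cnt : Int := tp_cn.length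
  let tn_cp := (pairs.filter (fun p => p.2 != c && p.1 == c)).map (fun _ => ())
  let C_cnt : Int := tn_cp.length
  let tn_cn := (pairs.filter (fun p => p.2 != c && p.1 != c)).map (fun _ => ())
  let D_cnt : Int := tn_cn.length
  (A_cnt, B_cnt, C_cnt, D_cnt)

-- ===== PORT B =====
def category_ABCD_alt (c : String) (actual : List String) (expected : List String) : Int × Int × Int × Int :=
  (actual.zip expected).foldl
    (fun (s : Int × Int × Int × Int) p =>
      let (A, B, C, D) := s
      if p.2 == c then
        if p.1 == c then (A + 1, B, C, D) else (A, B + 1, C, D)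
      else
        if p.1 == c then (A, B, C + 1, D) else (A, B, C, D + 1))
    (0, 0, 0, 0)

-- ===== PRECONDITION & SPEC =====
def Spec_category_ABCD (c : String) (actual : List String) (expected : List String) (out : Int × Int × Int × Int) : Prop := out = category_ABCD_alt c actual expected
instance (c : String) (actual : List String) (expected : List String) (out : Int × Int × Int × Int) : Decidable (Spec_category_ABCD c actual expected out) := by unfold Spec_category_ABCD; infer_instance

-- ===== CLAIM (what is proved, stated in full; the proofs are below) =====
def Claim_equal_category_ABCD : Prop := ∀ (c : String) (actual : List String) (expected : List String), Dom_category_ABCD c actual expected → Spec_category_ABCD c actual expected (category_ABCD c actual expected)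

-- ===== LEMMAS AND PROOFS =====

-- ===== VERDICT (by name: the statement is the Claim_ definition above) =====
lemma fold_counts (c : String) (l : List (String × String)) (A B C D : Int) :
    l.foldl
      (fun (s : Int × Int × Int × Int) p =>
        let (A, B, C, D) := s
        if p.2 == c then
          if p.1 == c then (A + 1, B, C, D) else (A, B + 1, C, D)
        else
          if p.1 == c then (A, B, C + 1, D) else (A, B, C, D + 1))
      (A, B, C, D)
    = (A + ((l.filter (fun p => p.2 == c && p.1 == c)).length : Int),
       B + ((l.filter (fun p => p.2 == c && p.1 != c)).length : Int),
       C + ((l.filter (fun p => p.2 != c && p.1 == c)).length : Int),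
       D + ((l.filter (fun p => p.2 != c && p.1 != c)).length : Int)) := by
  induction l generalizing A B C D with
  | nil => simp
  | cons h t ih =>
    rw [List.foldl_cons]
    by_cases h2 : h.2 == c <;> by_cases h1 : h.1 == c <;>
      simp only [h1, h2, Bool.false_eq_true, if_true, if_false] <;>
      rw [ih] <;>
      simp [List.filter_cons, bne, h1, h2] <;> push_cast <;> ring

theorem category_ABCD_spec : Claim_equal_category_ABCD := by
  intro c actual expected _
  unfold Spec_category_ABCD category_ABCD category_ABCD_alt
  rw [fold_counts]
  simp
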